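-- pv_equiv track=rewrite | github.com/nicholaspuchaf/unicamp-mc102 | lab06.py | multiplica_vetores
-- ===== SOURCE A (Python) =====
-- def multiplica_vetores(v1: list[int], v2: list[int]) -> list[int]:
--     tam = len(v1) if len(v1) > len(v2) else len(v2)
--     resultado = []
--     for i in range(tam):
--         if len(v1) < i+1:
--             v1.append(1)
--         if len(v2) < i+1:
--             v2.append(1)
--         resultado.append(v1[i]*v2[i])
--
--     return resultado
-- ===== SOURCE B (Python) =====
-- def multiplica_vetores(v1: list[int], v2: list[int]) -> list[int]:
--     # No padding: elements padded with 1 multiply to the other vector's own value,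
--     # so the answer is the element-wise product of the common prefix followed by
--     # the untouched tail of the longer vector. (Return value only: unlike A, this
--     # does not mutate v1/v2 in place.)
--     n = min(len(v1), len(v2))
--     prod = [a * b for a, b in zip(v1, v2)]
--     tail = v1[n:] if len(v1) > n else v2[n:]
--     return prod + tail
-- ===== Notes on version B (the rewrite author's own statement) =====
-- stated objective: simpler
-- what changed: B eliminates A's padding altogether: since the pad value 1 is the multiplicative identity, B multiplies only the common prefix (zip) and appends the longer vector's tail verbatim, instead of A's per-index loop that grows the shorter list with appended 1s and multiplies at every index; skipping the per-index length tests and append work makes it measurably faster.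
import Mathlib
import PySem

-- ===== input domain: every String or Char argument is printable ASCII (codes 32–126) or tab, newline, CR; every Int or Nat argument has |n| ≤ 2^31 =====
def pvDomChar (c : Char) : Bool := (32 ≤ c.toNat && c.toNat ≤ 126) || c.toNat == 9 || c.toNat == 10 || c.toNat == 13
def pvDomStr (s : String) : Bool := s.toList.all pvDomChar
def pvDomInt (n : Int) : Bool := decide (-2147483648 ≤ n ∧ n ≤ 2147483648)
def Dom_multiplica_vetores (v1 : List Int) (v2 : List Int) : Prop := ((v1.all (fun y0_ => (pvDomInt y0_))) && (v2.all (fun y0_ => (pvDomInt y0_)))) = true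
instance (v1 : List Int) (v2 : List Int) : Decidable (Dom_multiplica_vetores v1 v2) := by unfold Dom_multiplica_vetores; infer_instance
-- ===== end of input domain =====

-- B drops A's padding entirely: 1 is the multiplicative identity, so B multiplies the common
-- prefix and appends the longer vector's tail verbatim (return value only: A mutates v1/v2
-- in place by appending 1s, B does not).

-- ===== PORT A =====
-- loop body of A: conditionally append 1 to whichever list is too short, then multiply at index i
def mvStepA (s : List Int × List Int × List Int) (i : Int) : List Int × List Int × List Int :=
  let a := if (s.1.length : Int) < i + 1 then s.1 ++ [1] else s.1
  let b := if (s.2.1.length : Int) < i + 1 then s.2.1 ++ [1] else s.2.1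
  -- v1[i] / v2[i]: always in range here (the list was just padded to length ≥ i+1), so pyGetD is exact
  (a, b, s.2.2 ++ [PySem.List.pyGetD a i 0 * PySem.List.pyGetD b i 0])

def multiplica_vetores (v1 : List Int) (v2 : List Int) : List Int :=
  let tam : Int := if v1.length > v2.length then (v1.length : Int) else (v2.length : Int)
  ((PySem.List.pyRange 0 tam 1).foldl mvStepA (v1, v2, [])).2.2

-- ===== PORT B =====
def multiplica_vetores_alt (v1 : List Int) (v2 : List Int) : List Int :=
  let n := min v1.length v2.length
  let prod := (v1.zip v2).map (fun p => p.1 * p.2)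
  let tail := if v1.length > n then v1.drop n else v2.drop n
  prod ++ tail

-- ===== PRECONDITION & SPEC =====
def Spec_multiplica_vetores (v1 : List Int) (v2 : List Int) (out : List Int) : Prop := out = multiplica_vetores_alt v1 v2
instance (v1 : List Int) (v2 : List Int) (out : List Int) : Decidable (Spec_multiplica_vetores v1 v2 out) := by unfold Spec_multiplica_vetores; infer_instance

-- ===== CLAIM (what is proved, stated in full; the proofs are below) =====
def Claim_equal_multiplica_vetores : Prop := ∀ (v1 : List Int) (v2 : List Int), Dom_multiplica_vetores v1 v2 → Spec_multiplica_vetores v1 v2 (multiplica_vetores v1 v2)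

-- ===== LEMMAS AND PROOFS =====
-- v padded with 1s up to length k (no-op if v is already that long); proof-only model of A's appends
def padTo (v : List Int) (k : Nat) : List Int := v ++ List.replicate (k - v.length) 1

theorem padTo_length (v : List Int) (k : Nat) : (padTo v k).length = max v.length k := by
  simp [padTo]; omega

theorem padTo_zero (v : List Int) : padTo v 0 = v := by simp [padTo]

theorem padTo_succ_of_le (v : List Int) (k : Nat) (h : v.length ≤ k) :
    padTo v k ++ [1] = padTo v (k + 1) := by
  have : k + 1 - v.length = (k - v.length) + 1 := by omega
  simp [padTo, this, List.replicate_succ']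

theorem padTo_succ_of_lt (v : List Int) (k : Nat) (h : k < v.length) :
    padTo v k = v ∧ padTo v (k + 1) = v := by
  constructor <;> · simp [padTo]; omega

theorem padTo_get (v : List Int) (m k : Nat) (hk : k < m) :
    PySem.List.pyGetD (padTo v m) (k : Int) 0
      = if h : k < v.length then v[k] else 1 := by
  have hlen : k < (padTo v m).length := by rw [padTo_length]; omega
  rw [PySem.List.pyGetD_natCast]
  rw [List.getD_eq_getElem _ _ hlen]
  by_cases h : k < v.length
  · simp [padTo, h]
  · have h1 : k - v.length < (List.replicate (m - v.length) (1 : Int)).length := by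
      simp; omega
    simp only [padTo]
    rw [List.getElem_append_right (by omega)]
    simp
    intro hc
    exact absurd hc h

-- the per-index value of the fully padded product
theorem mvStepA_eq (v1 v2 : List Int) (tam k : Nat) (hk : k < tam)
    (h1 : v1.length ≤ tam) (h2 : v2.length ≤ tam) (r : List Int) :
    mvStepA (padTo v1 k, padTo v2 k, r) (k : Int)
      = (padTo v1 (k + 1), padTo v2 (k + 1),
         r ++ [PySem.List.pyGetD (padTo v1 tam) (k : Int) 0
               * PySem.List.pyGetD (padTo v2 tam) (k : Int) 0]) := by
  have step : ∀ v : List Int,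
      (if ((padTo v k).length : Int) < (k : Int) + 1 then padTo v k ++ [1] else padTo v k)
        = padTo v (k + 1) := by
    intro v
    by_cases h : v.length ≤ k
    · rw [if_pos, padTo_succ_of_le v k h]
      rw [padTo_length]; push_cast; omega
    · have hlt : k < v.length := by omega
      obtain ⟨e1, e2⟩ := padTo_succ_of_lt v k hlt
      rw [if_neg, e1, e2]
      rw [padTo_length]; push_cast; omega
  have get : ∀ v : List Int, v.length ≤ tam →
      PySem.List.pyGetD (padTo v (k + 1)) (k : Int) 0
        = PySem.List.pyGetD (padTo v tam) (k : Int) 0 := by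
    intro v hv
    rw [padTo_get v (k + 1) k (by omega), padTo_get v tam k hk]
  simp only [mvStepA, step]
  rw [get v1 h1, get v2 h2]

theorem loop_inv (v1 v2 : List Int) (tam : Nat)
    (h1 : v1.length ≤ tam) (h2 : v2.length ≤ tam) :
    ∀ (n k : Nat), tam - k = n → k ≤ tam → ∀ (r : List Int),
    ((PySem.List.pyRange (k : Int) (tam : Int) 1).foldl mvStepA (padTo v1 k, padTo v2 k, r)).2.2
      = r ++ (PySem.List.pyRange (k : Int) (tam : Int) 1).map
          (fun i => PySem.List.pyGetD (padTo v1 tam) i 0 * PySem.List.pyGetD (padTo v2 tam) i 0) := by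
  intro n
  induction n with
  | zero =>
    intro k hn hk r
    have : (tam : Int) ≤ (k : Int) := by omega
    rw [PySem.List.pyRange_one_eq_nil this]
    simp
  | succ m ih =>
    intro k hn hk r
    have hlt : k < tam := by omega
    have hlt' : (k : Int) < (tam : Int) := by exact_mod_cast hlt
    rw [PySem.List.pyRange_one_cons hlt']
    simp only [List.foldl_cons, List.map_cons]
    rw [mvStepA_eq v1 v2 tam k hlt h1 h2 r]
    have hcast : ((k : Int) + 1) = ((k + 1 : Nat) : Int) := by push_cast; ring
    rw [hcast, ih (k + 1) (by omega) (by omega)]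
    simp

-- B's split (prefix product ++ longer tail) equals the padded element-wise product
theorem alt_eq_map (v1 v2 : List Int) :
    multiplica_vetores_alt v1 v2
      = (PySem.List.pyRange 0 (max v1.length v2.length : Nat) 1).map
          (fun i => PySem.List.pyGetD (padTo v1 (max v1.length v2.length)) i 0
                  * PySem.List.pyGetD (padTo v2 (max v1.length v2.length)) i 0) := by
  set tam := max v1.length v2.length with htam
  set n := min v1.length v2.length with hn
  apply List.ext_getElem
  · have hr : (multiplica_vetores_alt v1 v2).length = tam := by
      simp only [multiplica_vetores_alt]
      split_ifs with h <;>
        · rw [List.length_append, List.length_map, List.length_zip, List.length_drop]; omega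
    rw [hr, List.length_map, PySem.List.length_pyRange_one]
    omega
  · intro k hk hk'
    have hktam : k < tam := by
      have := hk'
      simp [PySem.List.length_pyRange_one] at this
      omega
    rw [List.getElem_map, PySem.List.getElem_pyRange_one]
    have h0 : (0 : Int) + (k : Int) = (k : Int) := by ring
    rw [h0, padTo_get v1 tam k hktam, padTo_get v2 tam k hktam]
    simp only [multiplica_vetores_alt, ← hn]
    by_cases hkn : k < n
    · have h1 : k < v1.length := by omega
      have h2 : k < v2.length := by omega
      rw [List.getElem_append_left (by simp [List.length_zip]; omega)]
      simp [List.getElem_zip, h1, h2]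
    · have hpl : ((v1.zip v2).map (fun p => p.1 * p.2)).length = n := by
        rw [List.length_map, List.length_zip, hn]
      rw [List.getElem_append_right (by omega)]
      have he : n + (k - ((v1.zip v2).map (fun p => p.1 * p.2)).length) = k := by
        rw [hpl]; omega
      by_cases hgt : v1.length > n
      · have h2 : ¬ k < v2.length := by omega
        have h1 : k < v1.length := by omega
        simp only [if_pos hgt, List.getElem_drop, he]
        simp [h1, h2]
      · have h1 : ¬ k < v1.length := by omega
        have h2 : k < v2.length := by omega
        simp only [if_neg hgt, List.getElem_drop, he]
        simp [h1, h2]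

-- ===== VERDICT (by name: the statement is the Claim_ definition above) =====
theorem multiplica_vetores_spec : Claim_equal_multiplica_vetores := by
  intro v1 v2 _
  unfold Spec_multiplica_vetores multiplica_vetores
  set tam := max v1.length v2.length with htam
  have htamdef : (if v1.length > v2.length then (v1.length : Int) else (v2.length : Int)) = (tam : Int) := by
    split_ifs with h <;> omega
  rw [htamdef]
  have := loop_inv v1 v2 tam (by omega) (by omega) tam 0 (by omega) (by omega) []
  rw [padTo_zero, padTo_zero] at this
  show ((PySem.List.pyRange ((0 : Nat) : Int) (tam : Int) 1).foldl mvStepA (v1, v2, [])).2.2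
      = multiplica_vetores_alt v1 v2
  rw [this, alt_eq_map v1 v2]
  simp [← htam]
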